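-- pv_equiv track=rewrite | github.com/dan-sazonov/olymp-playground | ЕГЭ/22/40738.py | f
-- ===== SOURCE A (Python) =====
-- def f(x):
--     a = 1
--     b = 0
--     while x > 0:
--         d = x % 9
--         a *= d
--         if d < 5:
--             b += d
--         x //= 9
--     return a, b
-- ===== SOURCE B (Python) =====
-- def f(x):
--     if x <= 0:
--         return 1, 0
--     # most-significant-first: find the largest power of 9 not exceeding x,
--     # then peel digits from the top by division and remainder subtraction
--     p = 1
--     while p * 9 <= x:
--         p *= 9
--     a, b = 1, 0
--     while p > 0:
--         d = x // p
--         a *= d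
--         if d < 5:
--             b += d
--         x -= d * p
--         p //= 9
--     return a, b
-- ===== Notes on version B (the rewrite author's own statement) =====
-- stated objective: alternative
-- what changed: B extracts the base-9 digits most-significant-first: it first computes the largest power of 9 not exceeding x, then peels the top digit with division by that power and subtracts it off, instead of A's least-significant-first modulo loop.
import Mathlib
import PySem

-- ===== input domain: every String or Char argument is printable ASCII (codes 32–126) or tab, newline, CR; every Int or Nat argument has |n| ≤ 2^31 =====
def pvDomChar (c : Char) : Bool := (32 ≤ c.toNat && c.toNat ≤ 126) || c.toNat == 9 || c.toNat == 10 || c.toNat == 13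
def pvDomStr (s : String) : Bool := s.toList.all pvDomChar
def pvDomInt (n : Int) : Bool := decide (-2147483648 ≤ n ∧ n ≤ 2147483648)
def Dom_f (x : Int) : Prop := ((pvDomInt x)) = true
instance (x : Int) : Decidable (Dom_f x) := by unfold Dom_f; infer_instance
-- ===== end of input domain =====

-- B extracts the base-9 digits most-significant-first (largest power of 9, then
-- division and subtraction from the top) instead of A's least-significant-first
-- modulo loop; objective: alternative (same cost, different traversal).

-- ===== PORT A =====
-- A's while-loop, carrying both accumulators a and b (least-significant digit first).
def fLoop (x a b : Int) : Int × Int :=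
  if _h : x > 0 then
    let d := PySem.Int.mod x 9
    fLoop (PySem.Int.floordiv x 9) (a * d) (if d < 5 then b + d else b)
  else (a, b)
termination_by x.toNat
decreasing_by rw [PySem.Int.floordiv_eq_ediv_of_pos (by omega : (0:Int) < 9)]; omega

def f (x : Int) : Int × Int := fLoop x 1 0

-- ===== PORT B =====
-- Source B's first loop: largest power of 9 not exceeding x.  The `0 < p` conjunct is a
-- totality guard only (the call chain always has p ≥ 1).
def powLoop (x p : Int) : Int :=
  if _h : 0 < p ∧ p * 9 ≤ x then powLoop x (p * 9) else p
termination_by (x - p).toNat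
decreasing_by omega

-- Source B's second loop: peel the top digit d = x // p, subtract d*p, divide p by 9.
def msdLoop (p x a b : Int) : Int × Int :=
  if _h : p > 0 then
    let d := PySem.Int.floordiv x p
    msdLoop (PySem.Int.floordiv p 9) (x - d * p) (a * d) (if d < 5 then b + d else b)
  else (a, b)
termination_by p.toNat
decreasing_by rw [PySem.Int.floordiv_eq_ediv_of_pos (by omega : (0:Int) < 9)]; omega

def f_alt (x : Int) : Int × Int :=
  if x ≤ 0 then (1, 0)
  else msdLoop (powLoop x 1) x 1 0

-- ===== PRECONDITION & SPEC =====
def Spec_f (x : Int) (out : Int × Int) : Prop := out = f_alt x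
instance (x : Int) (out : Int × Int) : Decidable (Spec_f x out) := by unfold Spec_f; infer_instance

-- ===== CLAIM (what is proved, stated in full; the proofs are below) =====
def Claim_equal_f : Prop := ∀ (x : Int), Dom_f x → Spec_f x (f x)

-- ===== LEMMAS AND PROOFS =====

-- the (least-significant-first) base-9 digit list of x, as A's loop consumes it
def fDigits (x : Int) : List Int :=
  if _h : x > 0 then PySem.Int.mod x 9 :: fDigits (PySem.Int.floordiv x 9) else []
termination_by x.toNat
decreasing_by rw [PySem.Int.floordiv_eq_ediv_of_pos (by omega : (0:Int) < 9)]; omega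

-- the most-significant-first digit list of x padded to exactly n digits
def padMsd : Nat → Int → List Int
  | 0, _ => []
  | n + 1, x => (x / (9:Int) ^ n) :: padMsd n (x % (9:Int) ^ n)

theorem foldl_mul_shift (l : List Int) (a : Int) :
    l.foldl (· * ·) a = a * l.foldl (· * ·) 1 := by
  induction l generalizing a with
  | nil => simp
  | cons d t ih =>
    simp only [List.foldl]
    rw [ih (a * d), ih (1 * d)]
    ring

theorem fLoop_eq (x a b : Int) :
    fLoop x a b = (a * (fDigits x).foldl (· * ·) 1,
                   b + ((fDigits x).filter (fun d => decide (d < 5))).sum) := by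
  induction x, a, b using fLoop.induct with
  | case1 x a b h d ih =>
    rw [fLoop, fDigits]
    simp only [h, dif_pos]
    simp only [dite_eq_ite] at ih
    show fLoop (PySem.Int.floordiv x 9) (a * d) (if d < 5 then b + d else b) = _
    rw [ih]
    simp only [List.foldl, List.filter_cons]
    rw [foldl_mul_shift _ (1 * d)]
    simp only [show PySem.Int.mod x 9 = d from rfl]
    by_cases hd : d < 5 <;> simp [hd, mul_assoc, add_assoc]
  | case2 x a b h =>
    rw [fLoop, fDigits]
    simp [h]

theorem fDigits_zero (x : Int) (h : x ≤ 0) : fDigits x = [] := by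
  rw [fDigits]; simp [show ¬ x > 0 by omega]

theorem fDigits_pos (x : Int) (h : 0 < x) :
    fDigits x = x % 9 :: fDigits (x / 9) := by
  rw [fDigits]
  rw [dif_pos h]
  rw [PySem.Int.mod_eq_emod_of_pos (by omega : (0:Int) < 9),
      PySem.Int.floordiv_eq_ediv_of_pos (by omega : (0:Int) < 9)]

theorem len_fDigits_le (n : Nat) (x : Int) (h : x < (9:Int) ^ n) :
    (fDigits x).length ≤ n := by
  induction n generalizing x with
  | zero =>
    have h1 : x < 1 := by simpa using h
    rw [fDigits_zero x (by omega)]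
    simp
  | succ n ih =>
    by_cases hx : 0 < x
    · rw [fDigits_pos x hx]
      have hlt : x / 9 < (9:Int) ^ n := by
        rw [Int.ediv_lt_iff_lt_mul (by omega : (0:Int) < 9)]
        calc x < (9:Int) ^ (n+1) := h
          _ = (9:Int) ^ n * 9 := by ring
      have := ih _ hlt
      simp only [List.length_cons]
      omega
    · rw [fDigits_zero x (by omega)]; simp

-- peeling the top digit: the digit list of d*9^n + x is, up to permutation,
-- d together with the digits of x padded with zeros to n positions
theorem fDigits_top_peel (n : Nat) (x d : Int) (hx0 : 0 ≤ x) (hxn : x < (9:Int) ^ n)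
    (hd0 : 0 < d) (hd9 : d < 9) :
    List.Perm (fDigits (d * (9:Int) ^ n + x))
      (d :: (List.replicate (n - (fDigits x).length) 0 ++ fDigits x)) := by
  induction n generalizing x with
  | zero =>
    have hx1 : x < 1 := by simpa using hxn
    have hx : x = 0 := by omega
    subst hx
    have hy : d * (9:Int) ^ 0 + 0 = d := by ring
    rw [hy, fDigits_pos d hd0]
    rw [Int.emod_eq_of_lt (by omega) (by omega),
        Int.ediv_eq_zero_of_lt (by omega) (by omega)]
    rw [fDigits_zero 0 (by omega)]
    simp
  | succ n ih =>
    have h9n : (0:Int) < (9:Int) ^ n := by positivity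
    have hypos : 0 < d * (9:Int) ^ (n+1) + x := by nlinarith
    rw [fDigits_pos _ hypos]
    have hy : d * (9:Int) ^ (n+1) + x = x + (d * (9:Int) ^ n) * 9 := by ring
    have hmod : (d * (9:Int) ^ (n+1) + x) % 9 = x % 9 := by
      rw [hy]
      generalize d * (9:Int) ^ n = c
      omega
    have hdiv : (d * (9:Int) ^ (n+1) + x) / 9 = d * (9:Int) ^ n + x / 9 := by
      rw [hy, Int.add_mul_ediv_right _ _ (by omega : (9:Int) ≠ 0)]
      ring
    have hx9 : x / 9 < (9:Int) ^ n := by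
      rw [Int.ediv_lt_iff_lt_mul (by omega : (0:Int) < 9)]
      calc x < (9:Int) ^ (n+1) := hxn
        _ = (9:Int) ^ n * 9 := by ring
    have hx90 : 0 ≤ x / 9 := Int.ediv_nonneg hx0 (by omega)
    have hper := ih (x / 9) hx90 hx9
    rw [hmod, hdiv]
    refine List.Perm.trans (List.Perm.cons _ hper) ?_
    by_cases hx : 0 < x
    · rw [fDigits_pos x hx]
      have hlen : (n + 1 - (x % 9 :: fDigits (x / 9)).length)
          = n - (fDigits (x / 9)).length := by
        simp only [List.length_cons]
        omega
      rw [hlen]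
      refine List.Perm.trans (List.Perm.swap d (x % 9) _) ?_
      exact List.Perm.cons d List.perm_middle.symm
    · have hx0' : x = 0 := by omega
      subst hx0'
      rw [show (0:Int) / 9 = 0 by decide, fDigits_zero 0 (by omega)]
      simp only [List.length_nil, Nat.sub_zero, List.append_nil,
                 show (0:Int) % 9 = 0 by decide]
      refine List.Perm.trans (List.Perm.swap d 0 _) ?_
      simp [List.replicate_succ]

-- the padded msd list is a permutation of the (zero-padded) lsd digit list
theorem padMsd_perm (n : Nat) (x : Int) (hx0 : 0 ≤ x) (hxn : x < (9:Int) ^ n) :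
    List.Perm (padMsd n x)
      (List.replicate (n - (fDigits x).length) 0 ++ fDigits x) := by
  induction n generalizing x with
  | zero =>
    have hx1 : x < 1 := by simpa using hxn
    rw [fDigits_zero x (by omega)]
    simp [padMsd]
  | succ n ih =>
    have h9n : (0:Int) < (9:Int) ^ n := by positivity
    have hm0 : 0 ≤ x % ((9:Int) ^ n) := Int.emod_nonneg x (by omega)
    have hmlt : x % ((9:Int) ^ n) < (9:Int) ^ n := Int.emod_lt_of_pos x h9n
    by_cases hsmall : x < (9:Int) ^ n
    · have hd : x / ((9:Int) ^ n) = 0 := Int.ediv_eq_zero_of_lt hx0 hsmall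
      have hm : x % ((9:Int) ^ n) = x := Int.emod_eq_of_lt hx0 hsmall
      have hlen := len_fDigits_le n x hsmall
      have hrep : (n + 1 - (fDigits x).length) = (n - (fDigits x).length) + 1 := by omega
      simp only [padMsd, hd, hm, hrep, List.replicate_succ, List.cons_append]
      exact List.Perm.cons 0 (ih x hx0 hsmall)
    · rw [not_lt] at hsmall
      set d := x / ((9:Int) ^ n) with hdd
      set x' := x % ((9:Int) ^ n) with hxx
      have hsum : d * (9:Int) ^ n + x' = x := by
        rw [mul_comm]; exact Int.ediv_add_emod x ((9:Int) ^ n)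
      have hd1 : 1 ≤ d := Int.le_ediv_iff_mul_le h9n |>.mpr (by omega)
      have hd9 : d < 9 := by
        rw [hdd, Int.ediv_lt_iff_lt_mul h9n]
        calc x < (9:Int) ^ (n+1) := hxn
          _ = 9 * (9:Int) ^ n := by ring
      have hxeq : x = d * (9:Int) ^ n + x' := by omega
      have hpeel := fDigits_top_peel n x' d hm0 hmlt (by omega) hd9
      rw [← hxeq] at hpeel
      have hlenx : (fDigits x).length = n + 1 := by
        have := hpeel.length_eq
        simp only [List.length_cons, List.length_append, List.length_replicate] at this
        have hl' := len_fDigits_le n x' hmlt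
        omega
      rw [hlenx]
      simp only [padMsd, Nat.sub_self, List.replicate, List.nil_append]
      exact List.Perm.trans (List.Perm.cons d (ih x' hm0 hmlt)) hpeel.symm

-- evaluation of B's second loop, started at p = 9^k, over the padded msd list
theorem msdLoop_eq (k : Nat) (x a b : Int) (hx0 : 0 ≤ x) (hxk : x < (9:Int) ^ (k+1)) :
    msdLoop ((9:Int) ^ k) x a b =
      (a * (padMsd (k+1) x).prod,
       b + ((padMsd (k+1) x).filter (fun d => decide (d < 5))).sum) := by
  induction k generalizing x a b with
  | zero =>
    rw [msdLoop, dif_pos (show (9:Int) ^ 0 > 0 by positivity)]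
    have hd : PySem.Int.floordiv x ((9:Int) ^ 0) = x := by
      rw [pow_zero, PySem.Int.floordiv_eq_ediv_of_pos (by omega : (0:Int) < 1)]
      simp
    have hp : PySem.Int.floordiv ((9:Int) ^ 0) 9 = 0 := by
      rw [pow_zero, PySem.Int.floordiv_eq_ediv_of_pos (by omega : (0:Int) < 9)]
      decide
    simp only [hd, hp]
    rw [msdLoop, dif_neg (show ¬ ((0:Int) > 0) by omega)]
    simp only [padMsd, pow_zero, Int.ediv_one, List.prod_cons, List.prod_nil,
               List.filter_cons, mul_one]
    rw [Prod.mk.injEq]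
    refine ⟨by ring, ?_⟩
    by_cases h : x < 5
    · simp [h]
    · simp [h]
  | succ k ih =>
    have h9k : (0:Int) < (9:Int) ^ (k+1) := by positivity
    rw [msdLoop, dif_pos (show (9:Int) ^ (k+1) > 0 from h9k)]
    have hd : PySem.Int.floordiv x ((9:Int) ^ (k+1)) = x / ((9:Int) ^ (k+1)) :=
      PySem.Int.floordiv_eq_ediv_of_pos h9k
    have hp : PySem.Int.floordiv ((9:Int) ^ (k+1)) 9 = (9:Int) ^ k := by
      rw [PySem.Int.floordiv_eq_ediv_of_pos (by omega : (0:Int) < 9)]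
      rw [pow_succ, Int.mul_ediv_cancel _ (by omega : (9:Int) ≠ 0)]
    set d := x / ((9:Int) ^ (k+1)) with hdd
    set x' := x % ((9:Int) ^ (k+1)) with hxx
    have hsum : d * (9:Int) ^ (k+1) + x' = x := by
      rw [mul_comm]; exact Int.ediv_add_emod x ((9:Int) ^ (k+1))
    have hsub : x - d * (9:Int) ^ (k+1) = x' := by omega
    have hx'0 : 0 ≤ x' := Int.emod_nonneg x (by omega)
    have hx'lt : x' < (9:Int) ^ (k+1) := Int.emod_lt_of_pos x h9k
    simp only [hd, hp, hsub]
    rw [ih x' (a * d) (if d < 5 then b + d else b) hx'0 hx'lt]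
    simp only [padMsd, List.prod_cons, List.filter_cons, ← hdd, ← hxx]
    rw [Prod.mk.injEq]
    refine ⟨by ring, ?_⟩
    by_cases h : d < 5
    · simp [h, List.sum_cons]; ring
    · simp [h]

-- characterisation of B's first loop
theorem powLoop_spec : ∀ (x p : Int), 0 < p → p ≤ x →
    ∃ k : Nat, powLoop x p = p * (9:Int) ^ k ∧ p * (9:Int) ^ k ≤ x ∧ x < p * (9:Int) ^ (k+1) := by
  intro x p
  induction p using powLoop.induct (x := x) with
  | case1 p h ih =>
    intro hp hpx
    rw [powLoop, dif_pos h]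
    obtain ⟨hp0, hpx'⟩ := h
    obtain ⟨k, h1, h2, h3⟩ := ih (by omega) (by omega)
    refine ⟨k + 1, by rw [h1]; ring, by rw [show p * (9:Int)^(k+1) = p * 9 * 9^k by ring]; exact h2, ?_⟩
    calc x < p * 9 * (9:Int) ^ (k+1) := h3
      _ = p * (9:Int) ^ (k+1+1) := by ring
  | case2 p h =>
    intro hp hpx
    rw [powLoop, dif_neg h]
    have h9 : ¬ (p * 9 ≤ x) := by
      intro hc; exact h ⟨hp, hc⟩
    refine ⟨0, by ring, by simpa using hpx, ?_⟩
    calc x < p * 9 := by omega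
      _ = p * (9:Int) ^ 1 := by ring

theorem foldl_eq_prod (l : List Int) : l.foldl (· * ·) 1 = l.prod := by
  rw [List.prod_eq_foldl]

-- top-level permutation: for 9^k ≤ x < 9^(k+1) the msd list is a permutation of fDigits x
theorem padMsd_perm_top (k : Nat) (x : Int) (h1 : (9:Int) ^ k ≤ x) (h2 : x < (9:Int) ^ (k+1)) :
    List.Perm (padMsd (k+1) x) (fDigits x) := by
  have h9k : (0:Int) < (9:Int) ^ k := by positivity
  have hper := padMsd_perm (k+1) x (by omega) h2
  have hlenx : (fDigits x).length = k + 1 := by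
    set d := x / ((9:Int) ^ k) with hdd
    set x' := x % ((9:Int) ^ k) with hxx
    have hsum : d * (9:Int) ^ k + x' = x := by
      rw [mul_comm]; exact Int.ediv_add_emod x ((9:Int) ^ k)
    have hx'0 : 0 ≤ x' := Int.emod_nonneg x (by omega)
    have hx'lt : x' < (9:Int) ^ k := Int.emod_lt_of_pos x h9k
    have hd1 : 1 ≤ d := Int.le_ediv_iff_mul_le h9k |>.mpr (by omega)
    have hd9 : d < 9 := by
      rw [hdd, Int.ediv_lt_iff_lt_mul h9k]
      calc x < (9:Int) ^ (k+1) := h2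
        _ = 9 * (9:Int) ^ k := by ring
    have hxeq : x = d * (9:Int) ^ k + x' := by omega
    have hpeel := fDigits_top_peel k x' d hx'0 hx'lt (by omega) hd9
    rw [← hxeq] at hpeel
    have := hpeel.length_eq
    simp only [List.length_cons, List.length_append, List.length_replicate] at this
    have hl' := len_fDigits_le k x' hx'lt
    omega
  rw [hlenx, Nat.sub_self] at hper
  simpa using hper

-- ===== VERDICT (by name: the statement is the Claim_ definition above) =====
theorem f_spec : Claim_equal_f := by
  intro x _
  unfold Spec_f f f_alt
  by_cases hx : x ≤ 0
  · rw [fLoop, dif_neg (show ¬ x > 0 by omega), if_pos hx]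
  · push_neg at hx
    rw [if_neg (by omega)]
    obtain ⟨k, h1, h2, h3⟩ := powLoop_spec x 1 (by omega) (by omega)
    simp only [one_mul] at h1 h2 h3
    rw [h1, msdLoop_eq k x 1 0 (by omega) h3, fLoop_eq]
    have hper := padMsd_perm_top k x h2 h3
    rw [foldl_eq_prod, hper.prod_eq, (hper.filter _).sum_eq]
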